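-- pv_equiv track=rewrite | github.com/KELLO83/chart | save_investor_flow.py | select_recent_dates
-- ===== SOURCE A (Python) =====
-- from typing import List, Sequence
--
-- def select_recent_dates(rows: Sequence[dict], days: int) -> List[dict]:
--     if not rows:
--         return []
--     unique_dates = sorted({row["date"] for row in rows})
--     keep = set(unique_dates[-days:])
--     filtered = [row for row in rows if row["date"] in keep]
--     filtered.sort(key=lambda r: (r["date"], r["investor"]))
--     return filtered
-- ===== SOURCE B (Python) =====
-- from collections import defaultdict
-- from typing import List, Sequence
--
-- def select_recent_dates(rows: Sequence[dict], days: int) -> List[dict]: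
--     groups = defaultdict(list)
--     for row in rows:
--         groups[row["date"]].append(row)
--     result = []
--     for d in sorted(groups)[-days:]:
--         result.extend(sorted(groups[d], key=lambda r: r["investor"]))
--     return result
-- ===== Notes on version B (the rewrite author's own statement) =====
-- stated objective: alternative
-- what changed: B replaces A's build-a-date-set / filter / single global sort by the (date, investor) pair key with one grouping pass into a dict of per-date buckets, then concatenates the investor-sorted bucket of each of the most recent dates in sorted-date order.
import Mathlib
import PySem

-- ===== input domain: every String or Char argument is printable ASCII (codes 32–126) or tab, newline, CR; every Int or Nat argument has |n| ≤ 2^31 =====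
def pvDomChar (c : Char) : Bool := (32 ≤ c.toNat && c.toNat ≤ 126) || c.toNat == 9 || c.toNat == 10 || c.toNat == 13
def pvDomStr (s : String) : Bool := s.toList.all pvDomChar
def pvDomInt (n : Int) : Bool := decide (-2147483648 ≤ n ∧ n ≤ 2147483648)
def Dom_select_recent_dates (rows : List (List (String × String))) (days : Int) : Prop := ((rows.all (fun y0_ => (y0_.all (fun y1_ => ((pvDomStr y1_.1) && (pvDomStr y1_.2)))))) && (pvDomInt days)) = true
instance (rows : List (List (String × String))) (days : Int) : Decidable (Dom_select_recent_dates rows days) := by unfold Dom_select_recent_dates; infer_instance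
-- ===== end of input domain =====

-- B groups the rows into per-date buckets with one dict pass and concatenates the
-- investor-sorted bucket of each kept date, instead of A's global sort of the filtered
-- list by a (date, investor) pair key (objective: alternative decomposition, same cost).

-- shared row accessors: Python's row["date"] / row["investor"] (total via a default;
-- Pre_ guarantees the keys are present, where getD coincides with the raising lookup)
def pvDate (r : List (String × String)) : String := PySem.Dict.getD (PySem.Dict.mk r) "date" ""

def pvInvestor (r : List (String × String)) : String := PySem.Dict.getD (PySem.Dict.mk r) "investor" ""

-- ===== PORT A =====
def select_recent_dates (rows : List (List (String × String))) (days : Int) : List (List (String × String)) :=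
  if rows = [] then []
  else
    let unique_dates := PySem.List.sorted (PySem.Set.ofList (rows.map pvDate)) (fun x => x)
    let keep : PySem.Set String := PySem.Set.ofList (PySem.List.slice unique_dates (some (-days)) none)
    let filtered := rows.filter (fun r => keep.contains (pvDate r))
    PySem.List.sorted2 filtered pvDate pvInvestor

-- ===== PORT B =====
def select_recent_dates_alt (rows : List (List (String × String))) (days : Int) : List (List (String × String)) :=
  let groups := rows.foldl (fun d r => d.modify (pvDate r) [] (fun b => b ++ [r]))
    (PySem.Dict.empty : PySem.Dict String (List (List (String × String))))
  let kept := PySem.List.slice (PySem.List.sorted groups.keys (fun x => x)) (some (-days)) none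
  kept.foldl (fun acc dt => acc ++ PySem.List.sorted (groups.getD dt []) pvInvestor) []

-- ===== PRECONDITION & SPEC =====
-- Pre_ requires every row to carry the "date" and "investor" keys (the rows' schema):
-- a row without "date", or a kept row without "investor", makes A raise KeyError.
def Pre_select_recent_dates (rows : List (List (String × String))) (days : Int) : Prop :=
  ∀ r ∈ rows, (PySem.Dict.get? (PySem.Dict.mk r) "date").isSome = true ∧
    (PySem.Dict.get? (PySem.Dict.mk r) "investor").isSome = true

instance (rows : List (List (String × String))) (days : Int) : Decidable (Pre_select_recent_dates rows days) := by
  unfold Pre_select_recent_dates; infer_instance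

def pvWitness_select_recent_dates : (List (List (String × String))) × Int :=
  ([[("date", "2024-01-02"), ("investor", "kim")], [("date", "2024-01-01"), ("investor", "lee")]], 1)

def Spec_select_recent_dates (rows : List (List (String × String))) (days : Int) (out : List (List (String × String))) : Prop := out = select_recent_dates_alt rows days
instance (rows : List (List (String × String))) (days : Int) (out : List (List (String × String))) : Decidable (Spec_select_recent_dates rows days out) := by unfold Spec_select_recent_dates; infer_instance

-- ===== CLAIM (what is proved, stated in full; the proofs are below) =====
def Claim_equal_select_recent_dates : Prop := ∀ (rows : List (List (String × String))) (days : Int), Dom_select_recent_dates rows days → Pre_select_recent_dates rows days → Spec_select_recent_dates rows days (select_recent_dates rows days)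

-- ===== LEMMAS AND PROOFS =====

-- the lexicographic (date, investor) comparison A's sort uses, and the investor-only one
def pvLt2 (a b : List (String × String)) : Bool :=
  decide (pvDate a < pvDate b) || (!decide (pvDate b < pvDate a) && decide (pvInvestor a < pvInvestor b))

def pvLtI (a b : List (String × String)) : Bool := decide (pvInvestor a < pvInvestor b)

theorem insertBy_append_left {α : Type} (before : α → α → Bool) (x : α) (as bs : List α)
    (h : ∀ y ∈ as, before x y = false) :
    PySem.List.insertBy before x (as ++ bs) = as ++ PySem.List.insertBy before x bs := by
  induction as with
  | nil => simp
  | cons a as ih =>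
    simp only [List.cons_append, PySem.List.insertBy, h a (by simp)]
    simp only [Bool.false_eq_true, if_false, List.cons.injEq, true_and]
    exact ih (fun y hy => h y (by simp [hy]))

theorem insertBy_eq_block (r : List (String × String)) (as bs : List (List (String × String)))
    (ha : ∀ y ∈ as, pvDate y = pvDate r) (hb : ∀ y ∈ bs, pvDate r < pvDate y) :
    PySem.List.insertBy pvLt2 r (as ++ bs) = PySem.List.insertBy pvLtI r as ++ bs := by
  induction as with
  | nil =>
    cases bs with
    | nil => rfl
    | cons b bs =>
      have : pvLt2 r b = true := by
        simp [pvLt2, hb b (by simp)]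
      simp [PySem.List.insertBy, this]
  | cons a as ih =>
    have hd : pvDate a = pvDate r := ha a (by simp)
    have h2 : pvLt2 r a = pvLtI r a := by
      simp [pvLt2, pvLtI, hd]
    simp only [List.cons_append, PySem.List.insertBy, h2]
    cases h : pvLtI r a with
    | true => simp
    | false =>
      simp only [Bool.false_eq_true, if_false, List.cons_append, List.cons.injEq, true_and]
      exact ih (fun y hy => ha y (by simp [hy]))

theorem insertBy_flatMap (S : List String) (hS : S.Pairwise (· < ·))
    (g : String → List (List (String × String)))
    (hg : ∀ dt ∈ S, ∀ y ∈ g dt, pvDate y = dt)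
    (r : List (String × String)) (hr : pvDate r ∈ S) :
    PySem.List.insertBy pvLt2 r (S.flatMap g) =
      S.flatMap (fun dt => if dt = pvDate r then PySem.List.insertBy pvLtI r (g dt) else g dt) := by
  induction S with
  | nil => cases hr
  | cons dt S ih =>
    have hlt : ∀ dt' ∈ S, dt < dt' := (List.pairwise_cons.mp hS).1
    rcases List.mem_cons.mp hr with heq | hmem
    · subst heq
      simp only [List.flatMap_cons]
      rw [insertBy_eq_block r (g (pvDate r)) _ (hg _ (by simp))]
      · congr 1
        refine (List.flatMap_congr (fun dt' hdt' => ?_)).symm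
        rw [if_neg]
        exact fun h => absurd (h ▸ hlt dt' hdt') (lt_irrefl _)
      · intro y hy
        rcases List.mem_flatMap.mp hy with ⟨dt', hdt', hy'⟩
        rw [hg dt' (by simp [hdt']) y hy']
        exact hlt dt' hdt'
    · have hne : ¬ dt = pvDate r := fun h => absurd (h ▸ hlt _ hmem) (lt_irrefl _)
      simp only [List.flatMap_cons, if_neg hne]
      rw [insertBy_append_left, ih (List.pairwise_cons.mp hS).2 (fun d hd => hg d (by simp [hd])) hmem]
      intro y hy
      have hy' : pvDate y = dt := hg dt (by simp) y hy
      have hlt' : pvDate y < pvDate r := hy' ▸ hlt _ hmem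
      have hl : (pvDate y).toList < (pvDate r).toList := String.lt_iff_toList_lt.mp hlt'
      simp only [pvLt2]
      simp
      exact ⟨le_of_lt hl, fun h => absurd h (not_le_of_gt hl)⟩

theorem sorted2_append_singleton (xs : List (List (String × String))) (r : List (String × String)) :
    PySem.List.sorted2 (xs ++ [r]) pvDate pvInvestor =
      PySem.List.insertBy pvLt2 r (PySem.List.sorted2 xs pvDate pvInvestor) := by
  simp only [PySem.List.sorted2, List.foldl_append, List.foldl_cons, List.foldl_nil]
  rfl

theorem sorted_inv_append_singleton (xs : List (List (String × String))) (r : List (String × String)) :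
    PySem.List.sorted (xs ++ [r]) pvInvestor =
      PySem.List.insertBy pvLtI r (PySem.List.sorted xs pvInvestor) := by
  simp only [PySem.List.sorted, List.foldl_append, List.foldl_cons, List.foldl_nil]
  rfl

-- the heart: A's single (date, investor)-sort over the filtered rows is the
-- concatenation, date by increasing date, of the investor-sorted buckets
theorem sorted2_eq_flatMap_buckets (l : List (List (String × String))) (S : List String)
    (hS : S.Pairwise (· < ·)) :
    PySem.List.sorted2 (l.filter (fun r => S.contains (pvDate r))) pvDate pvInvestor =
      S.flatMap (fun dt => PySem.List.sorted (l.filter (fun r => pvDate r == dt)) pvInvestor) := by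
  induction l using List.reverseRecOn with
  | nil => simp [PySem.List.sorted2, PySem.List.sorted]
  | append_singleton l r ih =>
    rw [List.filter_append]
    cases hc : (S.contains (pvDate r)) with
    | false =>
      have hnm : pvDate r ∉ S := by simpa using hc
      simp only [List.filter_cons, List.filter_nil, hc, Bool.false_eq_true, if_false, List.append_nil]
      rw [ih]
      refine List.flatMap_congr (fun dt hdt => ?_)
      rw [List.filter_append]
      have : (pvDate r == dt) = false := by
        simp only [beq_eq_false_iff_ne, ne_eq]
        exact fun h => hnm (h ▸ hdt)
      simp [this]
    | true =>
      simp only [List.filter_cons, hc, if_true, List.filter_nil]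
      rw [sorted2_append_singleton, ih,
        insertBy_flatMap S hS _ (fun dt _ y hy => by
          have := (PySem.List.mem_sorted _ _ _ _).mp hy
          simpa using (List.mem_filter.mp this).2) r (by simpa using hc)]
      refine List.flatMap_congr (fun dt _ => ?_)
      rw [List.filter_append]
      by_cases h : dt = pvDate r
      · simp [h, sorted_inv_append_singleton]
      · have : (pvDate r == dt) = false := by
          simp only [beq_eq_false_iff_ne, ne_eq]
          exact fun hh => h hh.symm
        simp [if_neg h, this]

theorem b_eq_flatMap (rows : List (List (String × String))) (days : Int) :
    select_recent_dates_alt rows days =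
      (PySem.List.slice (PySem.List.sorted (PySem.Set.ofList (rows.map pvDate)) (fun x => x))
          (some (-days)) none).flatMap
        (fun dt => PySem.List.sorted (rows.filter (fun r => pvDate r == dt)) pvInvestor) := by
  unfold select_recent_dates_alt
  have hfold : rows.foldl (fun d r => d.modify (pvDate r) [] (fun b => b ++ [r]))
      (PySem.Dict.empty : PySem.Dict String (List (List (String × String)))) =
      (rows.map (fun r => (pvDate r, r))).foldl (fun d p => d.modify p.1 [] (fun b => b ++ [p.2]))
        PySem.Dict.empty := by
    rw [List.foldl_map]
  have hkeys : (rows.foldl (fun d r => d.modify (pvDate r) [] (fun b => b ++ [r]))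
      (PySem.Dict.empty : PySem.Dict String (List (List (String × String))))).keys =
      PySem.Set.ofList (rows.map pvDate) := by
    rw [PySem.Dict.keys_foldl_modify_key rows pvDate [] (fun _ r => (fun b => b ++ [r]))]
    rfl
  rw [PySem.List.foldl_append_eq_flatMap, hkeys]
  simp only [List.nil_append]
  refine List.flatMap_congr (fun dt _ => ?_)
  rw [hfold, PySem.Dict.getD_foldl_modify_append]
  simp [List.filter_map, List.map_map, Function.comp_def]

-- ===== VERDICT (by name: the statement is the Claim_ definition above) =====
theorem select_recent_dates_spec : Claim_equal_select_recent_dates := by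
  unfold Claim_equal_select_recent_dates Spec_select_recent_dates
  intro rows days _ _
  unfold select_recent_dates
  by_cases hrows : rows = []
  · subst hrows
    rw [if_pos rfl, b_eq_flatMap]
    simp [PySem.List.slice_some_none, PySem.Set.ofList, PySem.List.sorted]
  · rw [if_neg hrows, b_eq_flatMap]
    show PySem.List.sorted2
        (rows.filter (fun r =>
          (PySem.Set.ofList (PySem.List.slice
              (PySem.List.sorted (PySem.Set.ofList (rows.map pvDate)) (fun x => x))
              (some (-days)) none) : PySem.Set String).contains (pvDate r)))
        pvDate pvInvestor = _
    have hpair : (PySem.List.slice (PySem.List.sorted (PySem.Set.ofList (rows.map pvDate)) (fun x => x))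
        (some (-days)) none).Pairwise (· < ·) := by
      rw [PySem.List.slice_some_none]
      exact (PySem.List.sorted_ofList_pairwise_lt (rows.map pvDate)).drop
    rw [← sorted2_eq_flatMap_buckets rows _ hpair]
    congr 1
    refine List.filter_congr (fun r _ => ?_)
    simp [PySem.Set.mem_ofList]
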